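-- pv_equiv track=rewrite | github.com/andresnorte/cursoPCAP | Section1/udemi3.py | calc_dice_scores
-- ===== SOURCE A (Python) =====
-- def calc_dice_scores(lst):
--     i = 0
--     for (d, b) in lst:
--         if d == b:
--             return 0
--         else:
--             i = i + (d + b)
--     return i
-- ===== SOURCE B (Python) =====
-- def calc_dice_scores(lst):
--     data = list(lst)
--     if any(d == b for d, b in data):
--         return 0
--     return sum(d + b for d, b in data)
-- ===== Notes on version B (the rewrite author's own statement) =====
-- stated objective: idiomatic
-- what changed: Replaced the single interleaved loop with early return by two separate passes: an any() test for an equal pair, then a sum() of the pair totals.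
import Mathlib
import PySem

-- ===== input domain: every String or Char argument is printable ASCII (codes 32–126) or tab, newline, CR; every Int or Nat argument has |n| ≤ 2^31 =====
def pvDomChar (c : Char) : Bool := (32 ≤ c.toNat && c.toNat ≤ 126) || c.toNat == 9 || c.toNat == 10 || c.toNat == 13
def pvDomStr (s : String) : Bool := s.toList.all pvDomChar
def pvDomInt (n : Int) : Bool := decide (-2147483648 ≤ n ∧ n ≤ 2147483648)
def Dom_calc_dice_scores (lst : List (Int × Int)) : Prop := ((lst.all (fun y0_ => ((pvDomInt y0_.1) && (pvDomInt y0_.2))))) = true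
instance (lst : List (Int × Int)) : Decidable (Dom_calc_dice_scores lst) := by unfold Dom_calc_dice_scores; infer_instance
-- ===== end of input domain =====

-- B separates the equal-pair test from the accumulation into two idiomatic passes (same O(n) cost).


-- ===== PORT A =====
-- loop with accumulator i; early return 0 on an equal pair
def pvLoopA : List (Int × Int) → Int → Int
  | [], i => i
  | (d, b) :: t, i => if d == b then 0 else pvLoopA t (i + (d + b))

def calc_dice_scores (lst : List (Int × Int)) : Int := pvLoopA lst 0

-- ===== PORT B =====
-- B: two passes — any() test for an equal pair, then sum() of pair totals
def calc_dice_scores_alt (lst : List (Int × Int)) : Int :=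
  if lst.any (fun p => p.1 == p.2) then 0
  else (lst.map (fun p => p.1 + p.2)).sum

-- ===== PRECONDITION & SPEC =====
def Spec_calc_dice_scores (lst : List (Int × Int)) (out : Int) : Prop := out = calc_dice_scores_alt lst
instance (lst : List (Int × Int)) (out : Int) : Decidable (Spec_calc_dice_scores lst out) := by unfold Spec_calc_dice_scores; infer_instance

-- ===== CLAIM (what is proved, stated in full; the proofs are below) =====
def Claim_equal_calc_dice_scores : Prop := ∀ (lst : List (Int × Int)), Dom_calc_dice_scores lst → Spec_calc_dice_scores lst (calc_dice_scores lst)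

-- ===== LEMMAS AND PROOFS =====

-- ===== VERDICT (by name: the statement is the Claim_ definition above) =====
lemma pvLoopA_char (l : List (Int × Int)) (i : Int) :
    pvLoopA l i = if l.any (fun p => p.1 == p.2) then 0
                  else i + (l.map (fun p => p.1 + p.2)).sum := by
  induction l generalizing i with
  | nil => simp [pvLoopA]
  | cons h t ih =>
    obtain ⟨d, b⟩ := h
    by_cases hdb : d = b
    · simp [pvLoopA, hdb]
    · simp only [pvLoopA, beq_iff_eq, hdb, if_false, ih, List.any_cons,
        List.map_cons, List.sum_cons]
      by_cases h : (t.any fun p => p.1 == p.2) = true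
      · simp [h]
      · simp [h, hdb]
        ring

theorem calc_dice_scores_spec : Claim_equal_calc_dice_scores := by
  intro lst _
  unfold Spec_calc_dice_scores calc_dice_scores calc_dice_scores_alt
  rw [pvLoopA_char]
  split <;> simp
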